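-- pv_equiv track=rewrite | github.com/erin-gibbs/Prototype_Search_Tool | streamlit_app.py | citation_range_text
-- ===== SOURCE A (Python) =====
-- from typing import Dict, List, Optional, Tuple
--
-- def citation_range_text(nums: List[int]) -> str:
--     nums = sorted(set(nums))
--     if not nums:
--         return ""
--
--     ranges = []
--     start = nums[0]
--     prev = nums[0]
--
--     for n in nums[1:]:
--         if n == prev + 1:
--             prev = n
--         else:
--             ranges.append(f"{start}-{prev}" if start != prev else f"{start}")
--             start = prev = n
--
--     ranges.append(f"{start}-{prev}" if start != prev else f"{start}")
--     return "[" + ", ".join(ranges) + "]"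
-- ===== SOURCE B (Python) =====
-- def citation_range_text(nums):
--     s = set(nums)
--     if not s:
--         return ""
--     starts = sorted(x for x in s if x - 1 not in s)
--     ends = sorted(x for x in s if x + 1 not in s)
--     parts = [f"{lo}-{hi}" if lo != hi else f"{lo}" for lo, hi in zip(starts, ends)]
--     return "[" + ", ".join(parts) + "]"
-- ===== Notes on version B (the rewrite author's own statement) =====
-- stated objective: alternative
-- what changed: A scans the sorted-deduped list once, tracking start/prev and emitting a range at each break; B never scans for breaks: it characterizes run boundaries by set membership (starts = elements x with x-1 not in the set, ends = elements with x+1 not in the set), sorts the two boundary sets independently and zips them into ranges.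
import Mathlib
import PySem

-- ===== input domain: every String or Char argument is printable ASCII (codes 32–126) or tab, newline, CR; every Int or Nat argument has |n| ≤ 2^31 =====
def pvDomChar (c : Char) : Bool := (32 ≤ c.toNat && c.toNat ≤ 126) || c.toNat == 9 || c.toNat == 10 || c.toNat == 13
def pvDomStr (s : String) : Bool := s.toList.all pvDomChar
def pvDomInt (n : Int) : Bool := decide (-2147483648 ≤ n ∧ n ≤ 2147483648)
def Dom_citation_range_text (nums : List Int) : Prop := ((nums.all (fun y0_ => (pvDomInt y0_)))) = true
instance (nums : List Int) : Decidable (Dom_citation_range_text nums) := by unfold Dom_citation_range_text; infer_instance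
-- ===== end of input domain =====

-- B replaces A's single break-detecting scan by a set-membership characterization of run
-- boundaries (starts = x with x-1 not in the set, ends = x with x+1 not in the set), sorted
-- independently and zipped; alternative algorithm, same asymptotic cost.

-- ===== PORT A =====
def pvFmtA (start prev : Int) : String :=
  if start ≠ prev then PySem.Int.toStr start ++ "-" ++ PySem.Int.toStr prev
  else PySem.Int.toStr start

def citation_range_text (nums : List Int) : String :=
  match PySem.List.sorted (PySem.Set.ofList nums) (fun x => x) false with
  | [] => ""
  | x :: rest =>
    let st := rest.foldl (fun (acc : List String × Int × Int) n =>
      if n = acc.2.2 + 1 then (acc.1, acc.2.1, n)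
      else (acc.1 ++ [pvFmtA acc.2.1 acc.2.2], n, n)) ([], x, x)
    let ranges := st.1 ++ [pvFmtA st.2.1 st.2.2]
    "[" ++ PySem.Str.join ", " ranges ++ "]"

-- ===== PORT B =====
def pvFmtB (p : Int × Int) : String :=
  if p.1 ≠ p.2 then PySem.Int.toStr p.1 ++ "-" ++ PySem.Int.toStr p.2
  else PySem.Int.toStr p.1

def citation_range_text_alt (nums : List Int) : String :=
  let s : PySem.Set Int := PySem.Set.ofList nums
  if s = [] then ""
  else
    let starts := PySem.List.sorted (s.filter (fun x => !(PySem.Set.contains s (x - 1)))) (fun x => x) false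
    let ends := PySem.List.sorted (s.filter (fun x => !(PySem.Set.contains s (x + 1)))) (fun x => x) false
    let parts := (starts.zip ends).map pvFmtB
    "[" ++ PySem.Str.join ", " parts ++ "]"

-- ===== PRECONDITION & SPEC =====
def Spec_citation_range_text (nums : List Int) (out : String) : Prop := out = citation_range_text_alt nums
instance (nums : List Int) (out : String) : Decidable (Spec_citation_range_text nums out) := by unfold Spec_citation_range_text; infer_instance

-- ===== CLAIM (what is proved, stated in full; the proofs are below) =====
def Claim_equal_citation_range_text : Prop := ∀ (nums : List Int), Dom_citation_range_text nums → Spec_citation_range_text nums (citation_range_text nums)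

-- ===== LEMMAS AND PROOFS =====

-- run decomposition of a strictly increasing list (proof-side bridge between the two ports)
def pvTakeRun (hi : Int) : List Int → Int × List Int
  | [] => (hi, [])
  | y :: ys => if y = hi + 1 then pvTakeRun y ys else (hi, y :: ys)

theorem pvTakeRun_len (hi : Int) (l : List Int) : (pvTakeRun hi l).2.length ≤ l.length := by
  induction l generalizing hi with
  | nil => simp [pvTakeRun]
  | cons y ys ih =>
    simp only [pvTakeRun]
    split
    · exact le_trans (ih y) (by simp)
    · simp

def pvRuns : List Int → List (Int × Int)
  | [] => []
  | x :: xs =>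
    (x, (pvTakeRun x xs).1) :: pvRuns (pvTakeRun x xs).2
termination_by l => l.length
decreasing_by exact Nat.lt_succ_of_le (pvTakeRun_len x xs)

-- A-side: the fold equals run extraction followed by formatting
theorem pvLoop_eq (l : List Int) : ∀ (s p : Int) (acc : List String),
    (let st := l.foldl (fun (acc : List String × Int × Int) n =>
      if n = acc.2.2 + 1 then (acc.1, acc.2.1, n)
      else (acc.1 ++ [pvFmtA acc.2.1 acc.2.2], n, n)) (acc, s, p)
     st.1 ++ [pvFmtA st.2.1 st.2.2])
    = acc ++ (pvFmtB (s, (pvTakeRun p l).1) :: (pvRuns (pvTakeRun p l).2).map pvFmtB) := by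
  induction l with
  | nil => intro s p acc; simp [pvTakeRun, pvRuns, pvFmtA, pvFmtB]
  | cons n ns ih =>
    intro s p acc
    simp only [List.foldl_cons, pvTakeRun]
    by_cases h : n = p + 1
    · simp only [if_pos h]
      exact ih s n acc
    · simp only [if_neg h]
      rw [ih n n (acc ++ [pvFmtA s p])]
      simp [pvRuns, pvFmtA, pvFmtB]

-- B-side: run boundaries as chain scans
def pvStartsAux (p : Int) : List Int → List Int
  | [] => []
  | y :: ys => if y = p + 1 then pvStartsAux y ys else y :: pvStartsAux y ys

def pvEndsAux (p : Int) : List Int → List Int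
  | [] => [p]
  | y :: ys => if y = p + 1 then pvEndsAux y ys else p :: pvEndsAux y ys

theorem pvStartsAux_runs (t : List Int) : ∀ p, pvStartsAux p t = ((pvRuns (pvTakeRun p t).2).map Prod.fst) := by
  induction t with
  | nil => intro p; simp [pvStartsAux, pvTakeRun, pvRuns]
  | cons y ys ih =>
    intro p
    simp only [pvStartsAux, pvTakeRun]
    by_cases h : y = p + 1
    · simp only [if_pos h]; exact ih y
    · simp only [if_neg h]
      rw [pvRuns]
      simp only [List.map_cons]
      rw [ih y]

theorem pvEndsAux_runs (t : List Int) : ∀ p, pvEndsAux p t = (pvTakeRun p t).1 :: ((pvRuns (pvTakeRun p t).2).map Prod.snd) := by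
  induction t with
  | nil => intro p; simp [pvEndsAux, pvTakeRun, pvRuns]
  | cons y ys ih =>
    intro p
    simp only [pvEndsAux, pvTakeRun]
    by_cases h : y = p + 1
    · simp only [if_pos h]; exact ih y
    · simp only [if_neg h]
      rw [pvRuns]
      simp only [List.map_cons]
      rw [ih y]

-- filters over a strictly increasing list reduce to the chain scans
theorem pvFilt1Aux (t : List Int) : ∀ (p : Int) (f : Int → Bool),
    (p :: t).Pairwise (· < ·) →
    (∀ y ∈ t, f y = (!(decide (y - 1 = p)) && !(decide ((y - 1) ∈ t)))) →
    t.filter f = pvStartsAux p t := by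
  induction t with
  | nil => intro p f _ _; simp [pvStartsAux]
  | cons y ys ih =>
    intro p f hp hf
    have hpy : p < y := (List.pairwise_cons.mp hp).1 y (by simp)
    have hys : ∀ z ∈ ys, y < z := ((List.pairwise_cons.mp (List.pairwise_cons.mp hp).2).1)
    have hfy : f y = !(decide (y - 1 = p)) := by
      rw [hf y (by simp)]
      have h1 : ¬ (y - 1) ∈ y :: ys := by
        simp only [List.mem_cons, not_or]
        exact ⟨by omega, fun hm => by have := hys _ hm; omega⟩
      simp [h1]
    have hnext : ∀ z ∈ ys, f z = (!(decide (z - 1 = y)) && !(decide ((z - 1) ∈ ys))) := by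
      intro z hz
      rw [hf z (List.mem_cons_of_mem _ hz)]
      have hz1 : ¬ (z - 1 = p) := by have := hys z hz; omega
      by_cases h2 : z - 1 = y
      · simp [h2]
      · by_cases h3 : (z - 1) ∈ ys <;> simp [hz1, h2, h3]
    have hrec : ys.filter f = pvStartsAux y ys := by
      apply ih y f
      · exact List.pairwise_cons.mpr ⟨hys, (List.pairwise_cons.mp (List.pairwise_cons.mp hp).2).2⟩
      · exact hnext
    rw [List.filter_cons]
    simp only [pvStartsAux]
    by_cases h : y = p + 1
    · have hv : f y = false := by rw [hfy]; simp; omega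
      simp [hv, if_pos h, hrec]
    · have hv : f y = true := by rw [hfy]; simp; omega
      simp [hv, if_neg h, hrec]

theorem pvFilt2Aux (t : List Int) : ∀ (p : Int) (f : Int → Bool),
    (p :: t).Pairwise (· < ·) →
    (∀ y ∈ p :: t, f y = !(decide ((y + 1) ∈ p :: t))) →
    (p :: t).filter f = pvEndsAux p t := by
  induction t with
  | nil =>
    intro p f _ hf
    have hv : f p = true := by rw [hf p (by simp)]; simp
    simp [pvEndsAux, hv]
  | cons y ys ih =>
    intro p f hp hf
    have hpy : p < y := (List.pairwise_cons.mp hp).1 y (by simp)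
    have hys : ∀ z ∈ ys, y < z := ((List.pairwise_cons.mp (List.pairwise_cons.mp hp).2).1)
    have hfp : f p = !(decide (y = p + 1)) := by
      rw [hf p (by simp)]
      have h1 : (p + 1) ∈ p :: y :: ys ↔ y = p + 1 := by
        simp only [List.mem_cons]
        constructor
        · rintro (h | h | h)
          · omega
          · omega
          · have := hys _ h; omega
        · intro h; right; left; omega
      simp [h1]
    have hnext : ∀ z ∈ y :: ys, f z = !(decide ((z + 1) ∈ y :: ys)) := by
      intro z hz
      rw [hf z (List.mem_cons_of_mem _ hz)]
      have hzy : y ≤ z := by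
        rcases List.mem_cons.mp hz with h | h
        · omega
        · have := hys _ h; omega
      have h1 : ((z + 1) ∈ p :: y :: ys) ↔ ((z + 1) ∈ y :: ys) := by
        simp only [List.mem_cons]
        constructor
        · rintro (h | h)
          · omega
          · exact h
        · intro h; right; exact h
      simp [h1]
    have hrec : (y :: ys).filter f = pvEndsAux y ys := by
      exact ih y f (List.pairwise_cons.mp hp).2 hnext
    rw [List.filter_cons]
    simp only [pvEndsAux]
    by_cases h : y = p + 1
    · have hv : f p = false := by rw [hfp]; simp [h]
      simp [hv, if_pos h, hrec]
    · have hv : f p = true := by rw [hfp]; simp [h]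
      simp [hv, if_neg h, hrec]

-- whole-list filters equal the run projections
theorem pvFilterStarts (X : List Int) (hp : X.Pairwise (· < ·)) :
    X.filter (fun v => !(decide ((v - 1) ∈ X))) = (pvRuns X).map Prod.fst := by
  cases X with
  | nil => simp [pvRuns]
  | cons x rest =>
    rw [List.filter_cons]
    have hxs : ∀ z ∈ rest, x < z := (List.pairwise_cons.mp hp).1
    have hfx : (!(decide ((x - 1) ∈ x :: rest))) = true := by
      have h1 : ¬ (x - 1) ∈ x :: rest := by
        simp only [List.mem_cons, not_or]
        exact ⟨by omega, fun hm => by have := hxs _ hm; omega⟩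
      simp [h1]
    rw [hfx]
    simp only [if_true]
    have hhyp : ∀ y ∈ rest, (fun v => !(decide ((v - 1) ∈ x :: rest))) y
        = (!(decide (y - 1 = x)) && !(decide ((y - 1) ∈ rest))) := by
      intro y hy
      by_cases h2 : y - 1 = x
      · simp [h2]
      · by_cases h3 : (y - 1) ∈ rest <;> simp [h2, h3]
    rw [pvFilt1Aux rest x _ hp hhyp]
    rw [pvStartsAux_runs, pvRuns]
    simp

theorem pvFilterEnds (X : List Int) (hp : X.Pairwise (· < ·)) :
    X.filter (fun v => !(decide ((v + 1) ∈ X))) = (pvRuns X).map Prod.snd := by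
  cases X with
  | nil => simp [pvRuns]
  | cons x rest =>
    rw [pvFilt2Aux rest x _ hp (fun y _ => rfl)]
    rw [pvEndsAux_runs, pvRuns]
    simp

-- zip of the two projections reassembles the run list
theorem pvZipProj (r : List (Int × Int)) : (r.map Prod.fst).zip (r.map Prod.snd) = r := by
  induction r with
  | nil => rfl
  | cons a t ih => simp [ih]

-- sorting the filtered set equals filtering the sorted set
theorem pvSortedFilter (nums : List Int) (g : Int → Bool) :
    PySem.List.sorted ((PySem.Set.ofList nums).filter g) (fun x => x) false
      = (PySem.List.sorted (PySem.Set.ofList nums) (fun x => x) false).filter g := by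
  apply PySem.List.sorted_eq_of_perm_of_pairwise_lt
  · exact (PySem.List.sorted_perm (PySem.Set.ofList nums) (fun x => x) false).filter g
  · exact List.Pairwise.sublist List.filter_sublist (PySem.List.sorted_ofList_pairwise_lt nums)

-- ===== VERDICT (by name: the statement is the Claim_ definition above) =====
theorem citation_range_text_spec : Claim_equal_citation_range_text := by
  intro nums _
  unfold Spec_citation_range_text citation_range_text citation_range_text_alt
  cases hX : PySem.List.sorted (PySem.Set.ofList nums) (fun x => x) false with
  | nil =>
    have hs : PySem.Set.ofList nums = [] := (PySem.List.sorted_eq_nil_iff _ _ _).mp hX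
    simp [hs]
  | cons x rest =>
    have hsne : ¬ (PySem.Set.ofList nums = []) := by
      intro h
      rw [(PySem.List.sorted_eq_nil_iff _ _ _).mpr h] at hX
      simp at hX
    have hp : (x :: rest).Pairwise (· < ·) := hX ▸ PySem.List.sorted_ofList_pairwise_lt nums
    have hmem : ∀ a : Int, (a ∈ PySem.Set.ofList nums) ↔ (a ∈ x :: rest) := by
      intro a
      rw [← hX, PySem.List.mem_sorted]
    have hc : ∀ a : Int, PySem.Set.contains (PySem.Set.ofList nums) a = decide (a ∈ x :: rest) := by
      intro a
      have h1 : (a ∈ x :: rest) ↔ a ∈ nums := by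
        rw [← hmem a, PySem.Set.mem_ofList]
      simp only [h1]
      simp
    have hg1 : ((PySem.Set.ofList nums).filter (fun v => !(PySem.Set.contains (PySem.Set.ofList nums) (v - 1))))
        = ((PySem.Set.ofList nums).filter (fun v => !(decide ((v - 1) ∈ x :: rest)))) := by
      apply List.filter_congr
      intro v _
      rw [hc]
    have hg2 : ((PySem.Set.ofList nums).filter (fun v => !(PySem.Set.contains (PySem.Set.ofList nums) (v + 1))))
        = ((PySem.Set.ofList nums).filter (fun v => !(decide ((v + 1) ∈ x :: rest)))) := by
      apply List.filter_congr
      intro v _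
      rw [hc]
    have hstarts : PySem.List.sorted ((PySem.Set.ofList nums).filter (fun v => !(PySem.Set.contains (PySem.Set.ofList nums) (v - 1)))) (fun x => x) false
        = (pvRuns (x :: rest)).map Prod.fst := by
      rw [hg1, pvSortedFilter, hX, pvFilterStarts _ hp]
    have hends : PySem.List.sorted ((PySem.Set.ofList nums).filter (fun v => !(PySem.Set.contains (PySem.Set.ofList nums) (v + 1)))) (fun x => x) false
        = (pvRuns (x :: rest)).map Prod.snd := by
      rw [hg2, pvSortedFilter, hX, pvFilterEnds _ hp]
    simp only [if_neg hsne, hstarts, hends, pvZipProj]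
    have hA := pvLoop_eq rest x x []
    simp only [List.nil_append] at hA
    rw [hA]
    rw [pvRuns]
    simp [pvFmtB]
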